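-- pv_equiv track=rewrite | github.com/tdardinier/advent_code_2020 | 20_main.py | possibleTiles
-- ===== SOURCE A (Python) =====
-- def rotateOnce(tile):
--     return [[tile[y][-(x+1)] for y in range(len(tile))] for x in range(len(tile))]
--
-- def flip1(tile):
--     return [[tile[x][-(y+1)] for y in range(len(tile))] for x in range(len(tile))]
--
-- def possibleTiles(tile):
--     l = []
--     for _ in range(2):
--         for i in range(4):
--             l.append(tile)
--             tile = rotateOnce(tile)
--         tile = flip1(tile)
--     return l
-- ===== SOURCE B (Python) =====
-- def possibleTiles(tile):
--     # closed-form: compute the first rotation g once, then read the other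
--     # orientations directly off g with coordinate transforms (no iterated state)
--     n = len(tile)
--     g = [[tile[y][-(x + 1)] for y in range(n)] for x in range(n)]
--     return [
--         tile,
--         g,
--         [[g[y][n - 1 - x] for y in range(n)] for x in range(n)],
--         [[g[n - 1 - x][n - 1 - y] for y in range(n)] for x in range(n)],
--         [[g[y][x] for y in range(n)] for x in range(n)],
--         [[g[n - 1 - x][y] for y in range(n)] for x in range(n)],
--         [[g[n - 1 - y][n - 1 - x] for y in range(n)] for x in range(n)],
--         [[g[x][n - 1 - y] for y in range(n)] for x in range(n)],
--     ]
-- ===== Notes on version B (the rewrite author's own statement) =====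
-- stated objective: alternative
-- what changed: Instead of iterating rotateOnce/flip1 to maintain a rotation state across two loops, B computes the first rotation g once and emits the remaining orientations directly as closed-form coordinate-transform comprehensions over g.
import Mathlib
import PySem

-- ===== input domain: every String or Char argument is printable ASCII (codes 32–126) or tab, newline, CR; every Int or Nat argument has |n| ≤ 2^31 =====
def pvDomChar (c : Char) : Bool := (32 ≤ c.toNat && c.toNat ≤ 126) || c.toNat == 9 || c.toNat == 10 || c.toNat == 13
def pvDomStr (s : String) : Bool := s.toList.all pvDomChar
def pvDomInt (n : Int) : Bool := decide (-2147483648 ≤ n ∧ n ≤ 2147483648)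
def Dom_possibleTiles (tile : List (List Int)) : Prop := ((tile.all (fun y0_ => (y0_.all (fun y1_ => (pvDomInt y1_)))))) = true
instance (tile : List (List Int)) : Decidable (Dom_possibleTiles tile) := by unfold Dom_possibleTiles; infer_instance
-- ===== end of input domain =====

-- B replaces the iterated rotate/flip state with one computed rotation g and seven
-- closed-form coordinate-transform comprehensions over g (objective: simpler).


-- ===== PORT A =====
def rotateOnceA (tile : List (List Int)) : List (List Int) :=
  (PySem.List.pyRange 0 (tile.length : Int) 1).map (fun x =>
    (PySem.List.pyRange 0 (tile.length : Int) 1).map (fun y =>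
      PySem.List.pyGetD (PySem.List.pyGetD tile y []) (-(x + 1)) 0))

def flip1A (tile : List (List Int)) : List (List Int) :=
  (PySem.List.pyRange 0 (tile.length : Int) 1).map (fun x =>
    (PySem.List.pyRange 0 (tile.length : Int) 1).map (fun y =>
      PySem.List.pyGetD (PySem.List.pyGetD tile x []) (-(y + 1)) 0))

def possibleTiles (tile : List (List Int)) : List (List (List Int)) :=
  (((PySem.List.pyRange 0 2 1).foldl (fun (s : List (List (List Int)) × List (List Int)) _ =>
      let s2 := (PySem.List.pyRange 0 4 1).foldl
        (fun (p : List (List (List Int)) × List (List Int)) _ =>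
          (p.1 ++ [p.2], rotateOnceA p.2)) s
      (s2.1, flip1A s2.2)) ([], tile))).1

-- ===== PORT B =====
def possibleTiles_alt (tile : List (List Int)) : List (List (List Int)) :=
  let n := tile.length
  let g := (List.range n).map (fun (x : Nat) => (List.range n).map (fun (y : Nat) =>
    PySem.List.pyGetD (PySem.List.pyGetD tile (y : Int) []) (-((x : Int) + 1)) 0))
  [ tile,
    g,
    (List.range n).map (fun x => (List.range n).map (fun y => ((g.getD y []).getD (n - 1 - x) 0))),
    (List.range n).map (fun x => (List.range n).map (fun y => ((g.getD (n - 1 - x) []).getD (n - 1 - y) 0))),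
    (List.range n).map (fun x => (List.range n).map (fun y => ((g.getD y []).getD x 0))),
    (List.range n).map (fun x => (List.range n).map (fun y => ((g.getD (n - 1 - x) []).getD y 0))),
    (List.range n).map (fun x => (List.range n).map (fun y => ((g.getD (n - 1 - y) []).getD (n - 1 - x) 0))),
    (List.range n).map (fun x => (List.range n).map (fun y => ((g.getD x []).getD (n - 1 - y) 0))) ]

-- ===== PRECONDITION & SPEC =====
-- Pre_ excludes exactly the tiles with a row shorter than len(tile), on which A raises IndexError.
def Pre_possibleTiles (tile : List (List Int)) : Prop :=
  ∀ row ∈ tile, tile.length ≤ row.length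
instance (tile : List (List Int)) : Decidable (Pre_possibleTiles tile) := by
  unfold Pre_possibleTiles; infer_instance

def pvWitness_possibleTiles : List (List Int) := [[1, 2], [3, 4]]

def Spec_possibleTiles (tile : List (List Int)) (out : List (List (List Int))) : Prop := out = possibleTiles_alt tile
instance (tile : List (List Int)) (out : List (List (List Int))) : Decidable (Spec_possibleTiles tile out) := by unfold Spec_possibleTiles; infer_instance

-- ===== CLAIM (what is proved, stated in full; the proofs are below) =====
def Claim_equal_possibleTiles : Prop := ∀ (tile : List (List Int)), Dom_possibleTiles tile → Pre_possibleTiles tile → Spec_possibleTiles tile (possibleTiles tile)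

-- ===== LEMMAS AND PROOFS =====

-- an n×n grid described by a coordinate function
def pvGrid (n : Nat) (f : Nat → Nat → Int) : List (List Int) :=
  (List.range n).map (fun x => (List.range n).map (fun y => f x y))

-- entry read off the first rotation of `tile` (rows may be longer than n)
def pvG (tile : List (List Int)) (x y : Nat) : Int :=
  (tile.getD y []).getD ((tile.getD y []).length - 1 - x) 0

theorem length_pvGrid (n : Nat) (f : Nat → Nat → Int) : (pvGrid n f).length = n := by
  simp [pvGrid]

theorem row_pvGrid {n x : Nat} (f : Nat → Nat → Int) (hx : x < n) :
    (pvGrid n f).getD x [] = (List.range n).map (f x) := by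
  rw [pvGrid, List.getD_eq_getElem?_getD, List.getElem?_map, List.getElem?_range hx]
  rfl

theorem getD_pvGrid {n x y : Nat} (f : Nat → Nat → Int) (hx : x < n) (hy : y < n) :
    ((pvGrid n f).getD x []).getD y 0 = f x y := by
  rw [row_pvGrid f hx, List.getD_eq_getElem?_getD, List.getElem?_map, List.getElem?_range hy]
  rfl

theorem pvGrid_congr {n : Nat} {f f' : Nat → Nat → Int}
    (h : ∀ x, x < n → ∀ y, y < n → f x y = f' x y) : pvGrid n f = pvGrid n f' := by
  unfold pvGrid
  apply List.map_congr_left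
  intro x hx
  apply List.map_congr_left
  intro y hy
  simp only [List.mem_range] at hx hy
  exact h x hx y hy

theorem pre_pvGrid (n : Nat) (f : Nat → Nat → Int) : Pre_possibleTiles (pvGrid n f) := by
  intro row hrow
  rw [length_pvGrid]
  unfold pvGrid at hrow
  obtain ⟨x, -, rfl⟩ := List.mem_map.mp hrow
  simp

-- mapping over pyRange 0 n 1 is mapping over List.range n
theorem mapRange {α : Type} (n : Nat) (f : Int → α) :
    (PySem.List.pyRange 0 (n : Int) 1).map f
      = (List.range n).map (fun (k : Nat) => f (k : Int)) := by
  rw [PySem.List.pyRange_zero_nat, List.map_map]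
  rfl

-- the negative-index entry of A's comprehensions, under Pre_
theorem entryA (tile : List (List Int)) (hpre : Pre_possibleTiles tile)
    {x y : Nat} (hx : x < tile.length) (hy : y < tile.length) :
    PySem.List.pyGetD (PySem.List.pyGetD tile (y : Int) []) (-((x : Int) + 1)) 0
      = pvG tile x y := by
  have hrow : PySem.List.pyGetD tile (y : Int) [] = tile.getD y [] := by
    simp [PySem.List.pyGetD_natCast]
  have hmem : tile.getD y [] ∈ tile := by
    rw [List.getD_eq_getElem?_getD, List.getElem?_eq_getElem hy]
    exact List.getElem_mem hy
  have hlen : x + 1 ≤ (tile.getD y []).length :=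
    Nat.le_trans (Nat.succ_le_of_lt hx) (hpre _ hmem)
  rw [hrow]
  have hcast : -((x : Int) + 1) = -(((x + 1 : Nat) : Int)) := by push_cast; ring
  rw [hcast, PySem.List.pyGetD_neg_natCast _ _ _ (by omega) hlen]
  unfold pvG
  conv_rhs => rw [List.getD_eq_getElem?_getD, List.getElem?_eq_getElem (by omega)]
  simp only [Option.getD_some]
  congr 1
  omega

theorem rotA_eq (tile : List (List Int)) (hpre : Pre_possibleTiles tile) :
    rotateOnceA tile = pvGrid tile.length (pvG tile) := by
  unfold rotateOnceA pvGrid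
  rw [mapRange]
  apply List.map_congr_left
  intro x hx
  rw [mapRange]
  apply List.map_congr_left
  intro y hy
  simp only [List.mem_range] at hx hy
  exact entryA tile hpre hx hy

theorem flipA_eq (tile : List (List Int)) (hpre : Pre_possibleTiles tile) :
    flip1A tile = pvGrid tile.length (fun x y => pvG tile y x) := by
  unfold flip1A pvGrid
  rw [mapRange]
  apply List.map_congr_left
  intro x hx
  rw [mapRange]
  apply List.map_congr_left
  intro y hy
  simp only [List.mem_range] at hx hy
  exact entryA tile hpre hy hx

theorem pvG_pvGrid {n : Nat} (f : Nat → Nat → Int) {x y : Nat} (hx : x < n) (hy : y < n) :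
    pvG (pvGrid n f) x y = f y (n - 1 - x) := by
  unfold pvG
  rw [row_pvGrid f hy, List.length_map, List.length_range]
  rw [List.getD_eq_getElem?_getD, List.getElem?_map, List.getElem?_range (by omega : n - 1 - x < n)]
  rfl

theorem rotA_grid (n : Nat) (f : Nat → Nat → Int) :
    rotateOnceA (pvGrid n f) = pvGrid n (fun x y => f y (n - 1 - x)) := by
  rw [rotA_eq _ (pre_pvGrid n f), length_pvGrid]
  exact pvGrid_congr (fun x hx y hy => pvG_pvGrid f hx hy)

theorem flipA_grid (n : Nat) (f : Nat → Nat → Int) :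
    flip1A (pvGrid n f) = pvGrid n (fun x y => f x (n - 1 - y)) := by
  rw [flipA_eq _ (pre_pvGrid n f), length_pvGrid]
  exact pvGrid_congr (fun x hx y hy => pvG_pvGrid f hy hx)

-- B's g is the grid of pvG
theorem gB_eq (tile : List (List Int)) (hpre : Pre_possibleTiles tile) :
    (List.range tile.length).map (fun (x : Nat) => (List.range tile.length).map (fun (y : Nat) =>
      PySem.List.pyGetD (PySem.List.pyGetD tile (y : Int) []) (-((x : Int) + 1)) 0))
      = pvGrid tile.length (pvG tile) := by
  unfold pvGrid
  apply List.map_congr_left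
  intro x hx
  apply List.map_congr_left
  intro y hy
  simp only [List.mem_range] at hx hy
  exact entryA tile hpre hx hy

-- B's derived orientations, read off a grid
theorem altOrient_eq (n : Nat) (f : Nat → Nat → Int) (ix iy : Nat → Nat → Nat)
    (hix : ∀ x, x < n → ∀ y, y < n → ix x y < n) (hiy : ∀ x, x < n → ∀ y, y < n → iy x y < n) :
    (List.range n).map (fun x => (List.range n).map (fun y =>
      (((pvGrid n f).getD (ix x y) []).getD (iy x y) 0)))
      = pvGrid n (fun x y => f (ix x y) (iy x y)) := by
  unfold pvGrid
  apply List.map_congr_left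
  intro x hx
  apply List.map_congr_left
  intro y hy
  simp only [List.mem_range] at hx hy
  exact getD_pvGrid f (hix x hx y hy) (hiy x hx y hy)

theorem possibleTiles_unfold (tile : List (List Int)) :
    possibleTiles tile =
      [tile, rotateOnceA tile, rotateOnceA (rotateOnceA tile),
       rotateOnceA (rotateOnceA (rotateOnceA tile)),
       flip1A (rotateOnceA (rotateOnceA (rotateOnceA (rotateOnceA tile)))),
       rotateOnceA (flip1A (rotateOnceA (rotateOnceA (rotateOnceA (rotateOnceA tile))))),
       rotateOnceA (rotateOnceA (flip1A (rotateOnceA (rotateOnceA (rotateOnceA (rotateOnceA tile)))))),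
       rotateOnceA (rotateOnceA (rotateOnceA (flip1A (rotateOnceA (rotateOnceA (rotateOnceA (rotateOnceA tile)))))))] := by
  have h2 : PySem.List.pyRange 0 2 1 = [0, 1] := by decide
  have h4 : PySem.List.pyRange 0 4 1 = [0, 1, 2, 3] := by decide
  simp [possibleTiles, h2, h4, List.foldl]

-- ===== VERDICT (by name: the statement is the Claim_ definition above) =====
theorem possibleTiles_spec : Claim_equal_possibleTiles := by
  intro tile _ hpre
  show possibleTiles tile = possibleTiles_alt tile
  rw [possibleTiles_unfold]
  show _ = possibleTiles_alt tile
  unfold possibleTiles_alt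
  simp only []
  rw [gB_eq tile hpre, rotA_eq tile hpre]
  set n := tile.length with hn
  set g := pvG tile with hg
  rw [rotA_grid, rotA_grid, rotA_grid, flipA_grid, rotA_grid, rotA_grid, rotA_grid]
  rw [altOrient_eq n _ (fun x _ => x) (fun x y => n - 1 - y) (by intro a ha b hb; simp only []; omega) (by intro a ha b hb; simp only []; omega)]
  rw [altOrient_eq n _ (fun x y => n - 1 - y) (fun x y => n - 1 - x) (by intro a ha b hb; simp only []; omega) (by intro a ha b hb; simp only []; omega)]
  rw [altOrient_eq n _ (fun x y => n - 1 - x) (fun x y => y) (by intro a ha b hb; simp only []; omega) (by intro a ha b hb; simp only []; omega)]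
  rw [altOrient_eq n _ (fun x y => y) (fun x y => x) (by intro a ha b hb; simp only []; omega) (by intro a ha b hb; simp only []; omega)]
  rw [altOrient_eq n _ (fun x y => n - 1 - x) (fun x y => n - 1 - y) (by intro a ha b hb; simp only []; omega) (by intro a ha b hb; simp only []; omega)]
  rw [altOrient_eq n _ (fun x y => y) (fun x y => n - 1 - x) (by intro a ha b hb; simp only []; omega) (by intro a ha b hb; simp only []; omega)]
  simp only [List.cons.injEq, and_true]
  refine ⟨trivial, trivial, trivial, trivial, ?_, ?_, ?_, ?_⟩ <;>
    · apply pvGrid_congr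
      intro x hx y hy
      congr 1 <;> (try congr 1) <;> omega
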